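-- pv_equiv track=rewrite | github.com/Guicbdiniz/CodewarsSolutions | Python/6 kyu/CasinoChips.py | solve_old
-- ===== SOURCE A (Python) =====
-- def solve_old(arr: list):
--     number_of_plays = 0
--
--     while max(arr) != sum(arr):
--         sorted_list = sorted(enumerate(arr), key=lambda x: x[1])
--         max_index = sorted_list[2][0]
--         second_max_index = sorted_list[1][0]
--         arr[max_index] -= 1
--         arr[second_max_index] -= 1
--         number_of_plays += 1
--
--     return number_of_plays
-- ===== SOURCE B (Python) =====
-- def solve_old(arr: list):
--     # same game, but without re-sorting the whole list every round: one linear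
--     # pass finds the three smallest (value, index) pairs (stable, as the stable
--     # sort would order them), and the running total is maintained instead of
--     # being re-summed; works on a copy, so the argument is not mutated.
--     arr = list(arr)
--     total = sum(arr)
--     plays = 0
--     while max(arr) != total:
--         b1 = b2 = b3 = None
--         for i, v in enumerate(arr):
--             if b1 is None or v < b1[0]:
--                 b1, b2, b3 = (v, i), b1, b2
--             elif b2 is None or v < b2[0]:
--                 b2, b3 = (v, i), b2
--             elif b3 is None or v < b3[0]:
--                 b3 = (v, i)
--         arr[b3[1]] -= 1
--         arr[b2[1]] -= 1
--         total -= 2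
--         plays += 1
--     return plays
-- ===== Notes on version B (the rewrite author's own statement) =====
-- stated objective: alternative
-- what changed: B plays the same rounds but replaces A's per-round full stable sort of (index, value) pairs by one linear pass that selects the three smallest entries, maintains the running total instead of re-summing each round, and works on a copy instead of mutating arr.
import Mathlib
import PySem

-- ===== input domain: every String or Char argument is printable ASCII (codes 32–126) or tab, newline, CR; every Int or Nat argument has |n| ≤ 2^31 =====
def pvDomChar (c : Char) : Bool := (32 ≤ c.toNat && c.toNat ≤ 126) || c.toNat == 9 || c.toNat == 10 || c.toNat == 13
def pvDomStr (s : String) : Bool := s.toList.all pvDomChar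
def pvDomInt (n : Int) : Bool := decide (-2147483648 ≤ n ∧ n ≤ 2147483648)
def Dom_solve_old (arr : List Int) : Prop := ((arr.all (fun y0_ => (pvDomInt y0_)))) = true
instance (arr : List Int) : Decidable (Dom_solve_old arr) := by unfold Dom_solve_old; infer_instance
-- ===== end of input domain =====

-- B plays the same rounds as A but replaces A's per-round full stable sort of
-- (index, value) pairs by one linear pass selecting the three smallest, and keeps
-- the running total instead of re-summing; equivalence is about the RETURN value
-- only (A mutates its argument in place, B works on a copy).


-- ===== PORT A =====
-- arr[i] -= 1 on the in-place list (i is a valid index produced by enumerate): exact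
def pvDecAt (xs : List Int) (i : Int) : List Int :=
  (PySem.List.enumerate xs).map (fun p => if p.1 = i then p.2 - 1 else p.2)

-- the while loop; the fuel only bounds the rounds (each round lowers the sum by 2
-- and a terminating run ends with a nonnegative sum, so sum.toNat + 1 is enough
-- whenever the Python terminates); none = exception or fuel out (Python diverges)
def solveOldLoop (fuel : Nat) (arr : List Int) (plays : Int) : Option Int :=
  match fuel with
  | 0 => none
  | fuel + 1 =>
    match PySem.List.max? arr (fun x => x) with
    | none => none          -- max([]) raises ValueError
    | some m =>
      if m ≠ arr.sum then
        let sorted_list := PySem.List.sorted (PySem.List.enumerate arr) (fun x => x.2) false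
        match PySem.List.pyGet? sorted_list 2, PySem.List.pyGet? sorted_list 1 with
        | some p2, some p1 =>                 -- IndexError otherwise
          solveOldLoop fuel (pvDecAt (pvDecAt arr p2.1) p1.1) (plays + 1)
        | _, _ => none
      else some plays

def solve_old (arr : List Int) : Int :=
  (solveOldLoop ((arr.sum).toNat + 1) arr 0).getD 0

-- ===== PORT B =====
-- 'bk is None or v < bk[0]' of Source B
def bLt (v : Int) (b : Option (Int × Int)) : Bool :=
  match b with
  | none => true
  | some m => decide (v < m.1)

-- one step of Source B's selection pass: q = (i, v) from enumerate, state = (b1, b2, b3)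
def bScanStep (s : Option (Int × Int) × Option (Int × Int) × Option (Int × Int))
    (q : Int × Int) : Option (Int × Int) × Option (Int × Int) × Option (Int × Int) :=
  match s with
  | (b1, b2, b3) =>
    if bLt q.2 b1 then (some (q.2, q.1), b1, b2)
    else if bLt q.2 b2 then (b1, some (q.2, q.1), b2)
    else if bLt q.2 b3 then (b1, b2, some (q.2, q.1))
    else (b1, b2, b3)

-- Source B's while loop; same fuel discipline as the A port
def solveAltLoop (fuel : Nat) (arr : List Int) (total plays : Int) : Option Int :=
  match fuel with
  | 0 => none
  | fuel + 1 =>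
    match PySem.List.max? arr (fun x => x) with
    | none => none          -- max([]) raises ValueError
    | some m =>
      if m ≠ total then
        match (PySem.List.enumerate arr).foldl bScanStep (none, none, none) with
        | (_, some b2, some b3) =>            -- b2/b3 still None raises TypeError
          solveAltLoop fuel (pvDecAt (pvDecAt arr b3.2) b2.2) (total - 2) (plays + 1)
        | _ => none
      else some plays

def solve_old_alt (arr : List Int) : Int :=
  (solveAltLoop ((arr.sum).toNat + 1) arr arr.sum 0).getD 0

-- ===== PRECONDITION & SPEC =====
-- Pre_ excludes exactly the inputs on which the Python raises: the empty list
-- (max([]) is a ValueError) and lists of fewer than 3 elements whose max differs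
-- from their sum (sorted_list[2] is an IndexError); everywhere else A returns or
-- loops forever (and then both ports agree on the fuel-out default).
def Pre_solve_old (arr : List Int) : Prop :=
  arr ≠ [] ∧ (3 ≤ arr.length ∨ (PySem.List.max? arr (fun x => x)).getD 0 = arr.sum)
instance (arr : List Int) : Decidable (Pre_solve_old arr) := by unfold Pre_solve_old; infer_instance

def pvWitness_solve_old : List Int := [1, 2, 3]

def Spec_solve_old (arr : List Int) (out : Int) : Prop := out = solve_old_alt arr
instance (arr : List Int) (out : Int) : Decidable (Spec_solve_old arr out) := by unfold Spec_solve_old; infer_instance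

-- ===== CLAIM (what is proved, stated in full; the proofs are below) =====
def Claim_equal_solve_old : Prop := ∀ (arr : List Int), Dom_solve_old arr → Pre_solve_old arr → Spec_solve_old arr (solve_old arr)

-- ===== LEMMAS AND PROOFS =====

-- the first three cells of a pair list, each written (value, index) as Source B keeps them
def f3sw (l : List (Int × Int)) :
    Option (Int × Int) × Option (Int × Int) × Option (Int × Int) :=
  (l[0]?.map (fun p => (p.2, p.1)), l[1]?.map (fun p => (p.2, p.1)),
    l[2]?.map (fun p => (p.2, p.1)))

-- one scan step tracks the first three cells through one stable insertion
lemma bScanStep_insertBy (l : List (Int × Int)) (q : Int × Int) :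
    bScanStep (f3sw l) q =
      f3sw (PySem.List.insertBy (fun a b => decide (a.2 < b.2)) q l) := by
  match l with
  | [] => simp [f3sw, bScanStep, bLt, PySem.List.insertBy]
  | [a] =>
    by_cases h1 : q.2 < a.2 <;>
      simp [f3sw, bScanStep, bLt, PySem.List.insertBy, h1]
  | [a, b] =>
    by_cases h1 : q.2 < a.2 <;> by_cases h2 : q.2 < b.2 <;>
      simp [f3sw, bScanStep, bLt, PySem.List.insertBy, h1, h2]
  | a :: b :: c :: t =>
    by_cases h1 : q.2 < a.2 <;> by_cases h2 : q.2 < b.2 <;> by_cases h3 : q.2 < c.2 <;>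
      simp [f3sw, bScanStep, bLt, PySem.List.insertBy, h1, h2, h3]

-- the whole scan = first three cells of the insertion-sort fold
lemma scan_foldl (ys : List (Int × Int)) : ∀ (l : List (Int × Int)),
    ys.foldl bScanStep (f3sw l) =
      f3sw (ys.foldl
        (fun acc x => PySem.List.insertBy (fun a b => decide (a.2 < b.2)) x acc) l) := by
  induction ys with
  | nil => intro l; simp
  | cons y ys ih =>
    intro l
    simp only [List.foldl_cons, bScanStep_insertBy]
    exact ih _

lemma scan_sorted (xs : List Int) :
    (PySem.List.enumerate xs).foldl bScanStep (none, none, none) =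
      f3sw (PySem.List.sorted (PySem.List.enumerate xs) (fun x => x.2) false) := by
  have h0 : (none, none, none) = f3sw ([] : List (Int × Int)) := by simp [f3sw]
  rw [h0, scan_foldl, PySem.List.sorted_eq_foldl_insertBy]

-- decrementing one valid position lowers the sum by exactly 1
lemma sum_decAt_aux (i : Int) (xs : List Int) : ∀ (s : Int),
    ((PySem.List.enumerate xs s).map
        (fun p => if p.1 = i then p.2 - 1 else p.2)).sum =
      xs.sum - (if s ≤ i ∧ i < s + xs.length then 1 else 0) := by
  induction xs with
  | nil => intro s; simp [PySem.List.enumerate_nil]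
  | cons x t ih =>
    intro s
    rw [PySem.List.enumerate_cons]
    simp only [List.map_cons, List.sum_cons, ih (s + 1), List.length_cons]
    by_cases hx : s = i <;> split_ifs <;> simp_all <;> omega

lemma sum_pvDecAt (xs : List Int) (i : Int) (h0 : 0 ≤ i) (h1 : i < xs.length) :
    (pvDecAt xs i).sum = xs.sum - 1 := by
  unfold pvDecAt
  rw [sum_decAt_aux i xs 0]
  simp
  omega

lemma length_pvDecAt (xs : List Int) (i : Int) : (pvDecAt xs i).length = xs.length := by
  simp [pvDecAt, PySem.List.length_enumerate]

-- an element of the sorted enumerate carries a valid index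
lemma sorted_enum_index (xs : List Int) (p : Int × Int)
    (hp : p ∈ PySem.List.sorted (PySem.List.enumerate xs) (fun x => x.2) false) :
    0 ≤ p.1 ∧ p.1 < xs.length := by
  have hmem : p ∈ PySem.List.enumerate xs 0 :=
    (PySem.List.mem_sorted _ _ _ _).mp hp
  rcases (PySem.List.mem_enumerate_iff _ _ _).mp hmem with ⟨k, hk, rfl⟩
  constructor
  · simp
  · simpa using (by exact_mod_cast hk : (k : Int) < xs.length)

-- the two loops march in lockstep (B's total is the current sum)
lemma loop_eq (fuel : Nat) : ∀ (arr : List Int) (plays : Int),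
    solveOldLoop fuel arr plays = solveAltLoop fuel arr arr.sum plays := by
  induction fuel with
  | zero => intro arr plays; rfl
  | succ n ih =>
    intro arr plays
    simp only [solveOldLoop, solveAltLoop]
    cases hmax : PySem.List.max? arr (fun x => x) with
    | none => rfl
    | some m =>
      by_cases hstop : m = arr.sum
      · simp [hstop]
      · simp only [ne_eq, hstop, not_false_eq_true, if_true]
        rw [scan_sorted]
        set s := PySem.List.sorted (PySem.List.enumerate arr) (fun x => x.2) false with hs
        have h1 : PySem.List.pyGet? s 1 = s[1]? := by
          by_cases hl : 1 < s.length <;>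
            simp [PySem.List.pyGet?, PySem.List.pyIdx?, hl]
        have h2 : PySem.List.pyGet? s 2 = s[2]? := by
          by_cases hl : 2 < s.length <;>
            simp [PySem.List.pyGet?, PySem.List.pyIdx?, hl]
        rw [h1, h2]
        cases hg2 : s[2]? with
        | none =>
          cases hg1 : s[1]? with
          | none => simp [f3sw, hg1, hg2]
          | some p1 => simp [f3sw, hg1, hg2]
        | some p2 =>
          cases hg1 : s[1]? with
          | none =>
            exfalso
            have hlen2 : 2 < s.length := List.getElem?_eq_some_iff.1 hg2 |>.1
            have : s[1]? = some s[1] := List.getElem?_eq_some_iff.2 ⟨by omega, rfl⟩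
            simp [this] at hg1
          | some p1 =>
            simp only [f3sw, hg1, hg2, Option.map_some]
            have hm1 : p1 ∈ s := List.mem_of_getElem? hg1
            have hm2 : p2 ∈ s := List.mem_of_getElem? hg2
            have hi1 := sorted_enum_index arr p1 (by rw [hs] at hm1; exact hm1)
            have hi2 := sorted_enum_index arr p2 (by rw [hs] at hm2; exact hm2)
            have hsum : (pvDecAt (pvDecAt arr p2.1) p1.1).sum = arr.sum - 2 := by
              rw [sum_pvDecAt _ _ hi1.1 (by rw [length_pvDecAt]; exact hi1.2),
                sum_pvDecAt _ _ hi2.1 hi2.2]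
              ring
            rw [ih, hsum]

theorem solve_old_spec : Claim_equal_solve_old := by
  intro arr _hdom _hpre
  unfold Spec_solve_old solve_old solve_old_alt
  rw [loop_eq]
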